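-- pv_equiv track=rewrite | github.com/leticiaalaura/exercicios | repeated_numbers.py | create_string
-- ===== SOURCE A (Python) =====
-- def create_string(memo):
--     div = 9
--     output = ''
--     for char, value in memo.items():
--         results=[]
--         while value > div:
--             results.append(div)
--             value = value - div
--         results.append(value)
--         string = ''
--         for n in results:
--             string += f'{char.upper()}{n}'
--         output += string
--     return output
-- ===== SOURCE B (Python) =====
-- def create_string(memo):
--     parts = []
--     for char, value in memo.items():
--         c = char.upper()
--         if value > 9:
--             q = (value - 1) // 9
--             parts.append(f'{c}9' * q + f'{c}{value - 9 * q}')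
--         else:
--             parts.append(f'{c}{value}')
--     return ''.join(parts)
-- ===== Notes on version B (the rewrite author's own statement) =====
-- stated objective: idiomatic
-- what changed: Replaces the repeated-subtraction while-loop and quadratic string += accumulation with a closed-form division (q = (value-1)//9, final = value-9*q) and a list + ''.join.
import Mathlib
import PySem

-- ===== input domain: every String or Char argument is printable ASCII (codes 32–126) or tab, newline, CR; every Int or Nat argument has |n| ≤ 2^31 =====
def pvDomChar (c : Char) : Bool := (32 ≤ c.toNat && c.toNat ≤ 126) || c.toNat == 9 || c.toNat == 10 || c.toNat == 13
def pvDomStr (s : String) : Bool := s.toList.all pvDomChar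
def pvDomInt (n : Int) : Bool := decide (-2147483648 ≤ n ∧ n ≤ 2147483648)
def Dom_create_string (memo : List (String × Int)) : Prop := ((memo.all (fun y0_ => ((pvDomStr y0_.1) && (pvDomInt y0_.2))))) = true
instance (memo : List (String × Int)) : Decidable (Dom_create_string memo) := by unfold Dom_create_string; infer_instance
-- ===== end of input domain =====

-- B replaces A's repeated-subtraction while-loop and quadratic `+=` accumulation by a
-- closed-form division (q = (value-1)//9) and a list + ''.join (idiomatic).


-- ===== PORT A =====
-- while value > div: results.append(div); value = value - div   (div = 9)
def csLoopA (value : Int) (results : List Int) : List Int :=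
  if value > 9 then csLoopA (value - 9) (results ++ [9]) else results ++ [value]
termination_by value.toNat
decreasing_by omega

def create_string (memo : List (String × Int)) : String :=
  memo.foldl (fun output cv =>
    let results := csLoopA cv.2 []
    let string := results.foldl
      (fun s n => s ++ PySem.Str.upper cv.1 ++ PySem.Int.toStr n) ""
    output ++ string) ""

-- ===== PORT B =====
def pieceB (char : String) (value : Int) : String :=
  let c := PySem.Str.upper char
  if value > 9 then
    let q := PySem.Int.floordiv (value - 1) 9
    PySem.Str.join "" (List.replicate q.toNat (c ++ PySem.Int.toStr 9))
      ++ (c ++ PySem.Int.toStr (value - 9 * q))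
  else
    c ++ PySem.Int.toStr value

def create_string_alt (memo : List (String × Int)) : String :=
  PySem.Str.join "" (memo.map (fun cv => pieceB cv.1 cv.2))

-- ===== PRECONDITION & SPEC =====
def Spec_create_string (memo : List (String × Int)) (out : String) : Prop := out = create_string_alt memo
instance (memo : List (String × Int)) (out : String) : Decidable (Spec_create_string memo out) := by unfold Spec_create_string; infer_instance

-- ===== CLAIM (what is proved, stated in full; the proofs are below) =====
def Claim_equal_create_string : Prop := ∀ (memo : List (String × Int)), Dom_create_string memo → Spec_create_string memo (create_string memo)

-- ===== LEMMAS AND PROOFS =====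

-- '' .join with empty separator peels off the head as plain concatenation
theorem join_empty_cons (s : String) (l : List String) :
    PySem.Str.join "" (s :: l) = s ++ PySem.Str.join "" l := by
  apply String.toList_inj.mp
  rcases l with _ | ⟨t, rest⟩
  · simp [PySem.Str.join, PySem.Chars.join, List.intercalate]
  · simp only [PySem.Str.toList_join, List.map_cons]
    rw [show ("" : String).toList = [] from rfl, PySem.Chars.join_cons_cons]
    simp [PySem.Str.toList_join]

theorem join_empty_nil : PySem.Str.join "" [] = "" := by
  apply String.toList_inj.mp
  simp [PySem.Str.toList_join, PySem.Chars.join_nil]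

theorem join_empty_append (l1 l2 : List String) :
    PySem.Str.join "" (l1 ++ l2) = PySem.Str.join "" l1 ++ PySem.Str.join "" l2 := by
  induction l1 with
  | nil =>
    apply String.toList_inj.mp
    simp [join_empty_nil]
  | cons x xs ih =>
    rw [List.cons_append, join_empty_cons, join_empty_cons, ih]
    apply String.toList_inj.mp
    simp

-- the value of A's while-loop, in closed form
def loopSpec (v : Int) : List Int :=
  if v > 9 then
    let q := PySem.Int.floordiv (v - 1) 9
    List.replicate q.toNat 9 ++ [v - 9 * q]
  else [v]

theorem csLoopA_eq (n : Nat) : ∀ (v : Int) (acc : List Int), v.toNat ≤ n →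
    csLoopA v acc = acc ++ loopSpec v := by
  induction n with
  | zero =>
    intro v acc h
    have hv : ¬ v > 9 := by omega
    rw [csLoopA, loopSpec]
    simp [hv]
  | succ n ih =>
    intro v acc h
    rw [csLoopA, loopSpec]
    by_cases hv : v > 9
    · simp only [hv, if_pos]
      rw [ih (v - 9) _ (by omega)]
      have hq : PySem.Int.floordiv (v - 1) 9 = (v - 1) / 9 :=
        PySem.Int.floordiv_eq_ediv_of_pos (by norm_num)
      rw [loopSpec]
      by_cases hv' : v - 9 > 9
      · have hq' : PySem.Int.floordiv (v - 9 - 1) 9 = (v - 9 - 1) / 9 :=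
          PySem.Int.floordiv_eq_ediv_of_pos (by norm_num)
        simp only [hv', if_pos, hq, hq']
        have h1 : ((v - 1) / 9).toNat = ((v - 9 - 1) / 9).toNat + 1 := by omega
        have h2 : v - 9 * ((v - 1) / 9) = v - 9 - 9 * ((v - 9 - 1) / 9) := by omega
        rw [h1, h2, List.replicate_succ]
        simp
      · have h1 : ((v - 1) / 9).toNat = 1 := by simp only [hq] at *; omega
        simp only [hv', if_neg, not_false_iff, hq, h1]
        have h2 : v - 9 * ((v - 1) / 9) = v - 9 := by simp only [hq] at *; omega
        rw [h2]
        simp [List.replicate]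
    · simp [hv]

-- string accumulation by += equals prefix ++ join of the pieces
theorem foldl_str (f : Int → String) : ∀ (l : List Int) (s0 : String),
    l.foldl (fun s n => s ++ f n) s0 = s0 ++ PySem.Str.join "" (l.map f) := by
  intro l
  induction l with
  | nil =>
    intro s0
    apply String.toList_inj.mp
    simp [PySem.Str.toList_join, PySem.Chars.join_nil]
  | cons x xs ih =>
    intro s0
    simp only [List.foldl_cons, List.map_cons, join_empty_cons]
    rw [ih]
    apply String.toList_inj.mp
    simp

-- per-entry: A's inner computation equals B's piece
theorem item_eq (c : String) (v : Int) :
    (csLoopA v []).foldl (fun s n => s ++ PySem.Str.upper c ++ PySem.Int.toStr n) ""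
      = pieceB c v := by
  rw [csLoopA_eq v.toNat v [] le_rfl]
  have hfold := foldl_str (fun n => PySem.Str.upper c ++ PySem.Int.toStr n)
  simp only [List.nil_append]
  rw [show (fun (s : String) n => s ++ PySem.Str.upper c ++ PySem.Int.toStr n)
        = (fun (s : String) n => s ++ (PySem.Str.upper c ++ PySem.Int.toStr n)) from by
      funext s n; apply String.toList_inj.mp; simp]
  rw [hfold, loopSpec, pieceB]
  by_cases hv : v > 9
  · simp only [hv, if_pos, List.map_append, List.map_replicate, List.map_cons, List.map_nil]
    rw [join_empty_append, join_empty_cons, join_empty_nil]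
    apply String.toList_inj.mp
    simp
  · simp only [hv, if_neg, not_false_iff, List.map_cons, List.map_nil]
    rw [join_empty_cons]
    apply String.toList_inj.mp
    simp [PySem.Str.toList_join, PySem.Chars.join_nil]

theorem main_eq : ∀ (memo : List (String × Int)), create_string memo = create_string_alt memo := by
  have gen : ∀ (memo : List (String × Int)) (out : String),
      memo.foldl (fun output cv =>
        output ++ (csLoopA cv.2 []).foldl
          (fun s n => s ++ PySem.Str.upper cv.1 ++ PySem.Int.toStr n) "") out
        = out ++ PySem.Str.join "" (memo.map (fun cv => pieceB cv.1 cv.2)) := by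
    intro memo
    induction memo with
    | nil =>
      intro out
      apply String.toList_inj.mp
      simp [PySem.Str.toList_join, PySem.Chars.join_nil]
    | cons cv rest ih =>
      intro out
      simp only [List.foldl_cons, List.map_cons, join_empty_cons]
      rw [ih, item_eq]
      apply String.toList_inj.mp
      simp
  intro memo
  rw [create_string, create_string_alt]
  simpa using gen memo ""

-- ===== VERDICT (by name: the statement is the Claim_ definition above) =====
theorem create_string_spec : Claim_equal_create_string := by
  intro memo _
  unfold Spec_create_string
  exact main_eq memo
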